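-- pv_equiv track=rewrite | github.com/ericmerle3789/Collatz-Junction-Theorem | research_log/R180_aperiodicity.py | check_periodicity
-- ===== SOURCE A (Python) =====
-- def check_periodicity(w):
--     """
--     Check if binary vector w is periodic with some period p < len(w) where p | len(w).
--     Returns (is_periodic, minimal_period).
--     """
--     S = len(w)
--     min_period = S  # aperiodic
--
--     for p in range(1, S):
--         if S % p != 0:
--             continue
--         periodic = True
--         for i in range(S):
--             if w[i] != w[i % p]:
--                 periodic = False
--                 break
--         if periodic:
--             min_period = p
--             break  # Found minimal period
--
--     return min_period < S, min_period
-- ===== SOURCE B (Python) =====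
-- def check_periodicity(w):
--     """
--     Check if binary vector w is periodic with some period p < len(w) where p | len(w).
--     Returns (is_periodic, minimal_period).
--     """
--     S = len(w)
--     for p in range(1, S):
--         if S % p == 0 and w == w[:p] * (S // p):
--             return True, p
--     return False, S
-- ===== Notes on version B (the rewrite author's own statement) =====
-- stated objective: alternative
-- what changed: A verifies each divisor period with an inner index loop and a flag comparing w[i] to w[i%p]; B instead tests whole-block structure: it returns the first divisor p whose p-prefix, repeated S//p times, rebuilds w (slice multiplication and one list comparison, no index loop, no flag, early return).
import Mathlib
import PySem

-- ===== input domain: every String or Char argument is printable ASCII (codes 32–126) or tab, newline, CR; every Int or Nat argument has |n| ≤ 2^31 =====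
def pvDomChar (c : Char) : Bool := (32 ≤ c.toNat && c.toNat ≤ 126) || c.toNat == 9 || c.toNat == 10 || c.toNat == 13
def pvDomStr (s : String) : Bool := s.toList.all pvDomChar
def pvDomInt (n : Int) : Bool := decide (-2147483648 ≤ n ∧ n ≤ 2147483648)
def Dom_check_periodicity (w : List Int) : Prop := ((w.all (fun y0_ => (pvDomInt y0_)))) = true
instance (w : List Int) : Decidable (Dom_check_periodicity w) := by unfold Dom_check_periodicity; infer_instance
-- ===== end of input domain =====

-- B replaces A's per-index tiling loop with a whole-block test: the first divisor p whose p-prefix repeated S/p times rebuilds w (objective: alternative).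

-- ===== PORT A =====
-- inner 'for i in range(S): if w[i] != w[i % p]: periodic = False; break' over the index list range(S);
-- indices are always in range, so getD is exact
def pvAInner (w : List Int) (p : Nat) : List Nat → Bool
  | [] => true
  | i :: rest =>
    if w.getD i 0 ≠ w.getD (i % p) 0 then false
    else pvAInner w p rest

-- outer 'for p in range(1, S): if S % p != 0: continue; … break' over range(1, S), with the post-loop return folded in
def pvAOuter (w : List Int) : List Nat → Nat
  | [] => w.length
  | p :: rest =>
    if w.length % p ≠ 0 then pvAOuter w rest
    else if pvAInner w p (List.range w.length) then p
    else pvAOuter w rest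

def check_periodicity (w : List Int) : Bool × Int :=
  let min_period := pvAOuter w (List.range' 1 (w.length - 1))
  (decide (min_period < w.length), (min_period : Int))

-- ===== PORT B =====
-- 'w[:p] * (S // p)' — list repetition by concatenation
def pvRepeat (xs : List Int) : Nat → List Int
  | 0 => []
  | k + 1 => xs ++ pvRepeat xs k

-- 'for p in range(1, S): if S % p == 0 and w == w[:p] * (S // p): return True, p' over range(1, S), then 'return False, S'
def pvBLoop (w : List Int) : List Nat → Bool × Int
  | [] => (false, (w.length : Int))
  | p :: rest =>
    if w.length % p = 0 ∧ w = pvRepeat (w.take p) (w.length / p) then (true, (p : Int))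
    else pvBLoop w rest

def check_periodicity_alt (w : List Int) : Bool × Int :=
  pvBLoop w (List.range' 1 (w.length - 1))

-- ===== PRECONDITION & SPEC =====
def Spec_check_periodicity (w : List Int) (out : Bool × Int) : Prop := out = check_periodicity_alt w
instance (w : List Int) (out : Bool × Int) : Decidable (Spec_check_periodicity w out) := by unfold Spec_check_periodicity; infer_instance

-- ===== CLAIM (what is proved, stated in full; the proofs are below) =====
def Claim_equal_check_periodicity : Prop := ∀ (w : List Int), Dom_check_periodicity w → Spec_check_periodicity w (check_periodicity w)

-- ===== LEMMAS AND PROOFS =====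

lemma pvAInner_iff (w : List Int) (p : Nat) (L : List Nat) :
    pvAInner w p L = true ↔ ∀ i ∈ L, w.getD i 0 = w.getD (i % p) 0 := by
  induction L with
  | nil => simp [pvAInner]
  | cons i rest ih =>
    rw [pvAInner]
    split_ifs with h
    · simp only [false_iff]
      intro hc
      exact h (hc i (List.mem_cons_self))
    · rw [ih]
      constructor
      · intro hr j hj
        rcases List.mem_cons.mp hj with rfl | hj'
        · exact not_ne_iff.mp h
        · exact hr j hj'
      · intro hr j hj
        exact hr j (List.mem_cons_of_mem i hj)

lemma pvRepeat_length (xs : List Int) (k : Nat) : (pvRepeat xs k).length = k * xs.length := by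
  induction k with
  | zero => simp [pvRepeat]
  | succ k ih => simp [pvRepeat, ih, Nat.succ_mul]; omega

lemma pvRepeat_getD (xs : List Int) (k i : Nat) (_hx : 0 < xs.length) (h : i < k * xs.length) :
    (pvRepeat xs k).getD i 0 = xs.getD (i % xs.length) 0 := by
  induction k generalizing i with
  | zero => omega
  | succ k ih =>
    by_cases hi : i < xs.length
    · rw [pvRepeat, List.getD_append _ _ _ _ hi, Nat.mod_eq_of_lt hi]
    · have h1 : xs.length ≤ i := by omega
      have hk : i - xs.length < k * xs.length := by
        have hs : (k + 1) * xs.length = k * xs.length + xs.length := by ring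
        omega
      have h2 : (xs ++ pvRepeat xs k).getD i 0 = (pvRepeat xs k).getD (i - xs.length) 0 := by
        simp only [List.getD]
        rw [List.getElem?_append_right h1]
      have h3 : (i - xs.length) % xs.length = i % xs.length := by
        conv_rhs => rw [show i = i - xs.length + xs.length by omega]
        rw [Nat.add_mod_right]
      rw [pvRepeat, h2, ih (i - xs.length) hk, h3]

-- the key bridge: for a divisor p, "w is the p-prefix repeated" = A's tiling property
lemma pvRepeat_iff (w : List Int) (p : Nat) (hp : 0 < p) (hpS : p ≤ w.length)
    (hd : w.length % p = 0) :
    w = pvRepeat (w.take p) (w.length / p) ↔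
      ∀ i, i < w.length → w.getD i 0 = w.getD (i % p) 0 := by
  have htl : (w.take p).length = p := by simp [Nat.min_eq_left hpS]
  have hlen : (pvRepeat (w.take p) (w.length / p)).length = w.length := by
    rw [pvRepeat_length, htl, Nat.div_mul_cancel (Nat.dvd_of_mod_eq_zero hd)]
  constructor
  · intro he i hi
    have h1 : w.getD i 0 = (w.take p).getD (i % p) 0 := by
      conv_lhs => rw [he]
      rw [pvRepeat_getD _ _ _ (by omega) (by rw [htl, Nat.div_mul_cancel (Nat.dvd_of_mod_eq_zero hd)]; exact hi), htl]
    rw [h1]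
    simp only [List.getD]
    rw [List.getElem?_take_of_lt (Nat.mod_lt i hp)]
  · intro h
    apply List.ext_getElem hlen.symm
    intro i hi1 hi2
    rw [← List.getD_eq_getElem w 0 hi1, ← List.getD_eq_getElem _ 0 hi2]
    rw [pvRepeat_getD _ _ _ (by omega)
      (by rw [htl, Nat.div_mul_cancel (Nat.dvd_of_mod_eq_zero hd)]; exact hi1), htl]
    simp only [List.getD]
    rw [List.getElem?_take_of_lt (Nat.mod_lt i hp)]
    exact h i hi1

-- the two scans agree step for step on any list of candidate periods 0 < p < |w|
lemma pvLoop_eq (w : List Int) (L : List Nat) (hL : ∀ p ∈ L, 0 < p ∧ p < w.length) :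
    pvBLoop w L = (decide (pvAOuter w L < w.length), (pvAOuter w L : Int)) := by
  induction L with
  | nil => simp [pvBLoop, pvAOuter]
  | cons p rest ih =>
    obtain ⟨hp0, hpS⟩ := hL p (List.mem_cons_self)
    have ihr := ih (fun q hq => hL q (List.mem_cons_of_mem p hq))
    rw [pvBLoop, pvAOuter]
    by_cases hmod : w.length % p = 0
    · rw [if_neg (not_not.mpr hmod)]
      by_cases hinner : pvAInner w p (List.range w.length) = true
      · rw [if_pos hinner,
          if_pos ⟨hmod, (pvRepeat_iff w p hp0 (le_of_lt hpS) hmod).mpr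
            (fun i hi => (pvAInner_iff w p (List.range w.length)).mp hinner i (List.mem_range.mpr hi))⟩]
        simp [hpS]
      · rw [if_neg hinner, if_neg ?_]
        · exact ihr
        · rintro ⟨-, heq⟩
          exact hinner ((pvAInner_iff w p (List.range w.length)).mpr
            (fun j hj => (pvRepeat_iff w p hp0 (le_of_lt hpS) hmod).mp heq j (List.mem_range.mp hj)))
    · rw [if_pos hmod, if_neg (fun hc => hmod hc.1)]
      exact ihr

-- ===== VERDICT (by name: the statement is the Claim_ definition above) =====
theorem check_periodicity_spec : Claim_equal_check_periodicity := by
  intro w _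
  show _ = _
  unfold check_periodicity check_periodicity_alt
  rw [pvLoop_eq w _ (fun p hp => by
    rcases List.mem_range'.mp hp with ⟨i, hi, rfl⟩
    omega)]
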